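-- pv_equiv track=rewrite | github.com/shalevgigi-VKS/Chadshani | Shalev's_Projects/5_StickerBot/processor/grid_detector.py | _gaps_to_bounds
-- ===== SOURCE A (Python) =====
-- def _gaps_to_bounds(gaps: list[tuple[int, int]], total_start: int, total_end: int) -> list[tuple[int, int]]:
--     """Convert gap ranges to panel boundary pairs."""
--     # Build list of non-gap segments
--     boundaries = []
--     prev = total_start
--
--     for gap_start, gap_end in gaps:
--         if gap_start > prev:
--             boundaries.append((prev, gap_start))
--         prev = gap_end
--
--     if prev < total_end:
--         boundaries.append((prev, total_end))
--
--     return boundaries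
-- ===== SOURCE B (Python) =====
-- def _gaps_to_bounds(gaps: list[tuple[int, int]], total_start: int, total_end: int) -> list[tuple[int, int]]:
--     """Convert gap ranges to panel boundary pairs (breakpoint-list decomposition)."""
--     # Flat breakpoint list: start, then each gap's endpoints, then end.
--     points = [total_start] + [x for g in gaps for x in g] + [total_end]
--     # Consume breakpoints two at a time; keep only non-empty segments.
--     out = []
--     it = iter(points)
--     for a in it:
--         b = next(it)
--         if a < b:
--             out.append((a, b))
--     return out
-- ===== Notes on version B (the rewrite author's own statement) =====
-- stated objective: alternative
-- what changed: Instead of A's single pass tracking a prev accumulator and appending complement segments as it goes, B first builds a flat breakpoint list [total_start, g1_start, g1_end, ..., total_end] and then consumes it two points at a time, keeping each (left, right) pair with left < right.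
import Mathlib
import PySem

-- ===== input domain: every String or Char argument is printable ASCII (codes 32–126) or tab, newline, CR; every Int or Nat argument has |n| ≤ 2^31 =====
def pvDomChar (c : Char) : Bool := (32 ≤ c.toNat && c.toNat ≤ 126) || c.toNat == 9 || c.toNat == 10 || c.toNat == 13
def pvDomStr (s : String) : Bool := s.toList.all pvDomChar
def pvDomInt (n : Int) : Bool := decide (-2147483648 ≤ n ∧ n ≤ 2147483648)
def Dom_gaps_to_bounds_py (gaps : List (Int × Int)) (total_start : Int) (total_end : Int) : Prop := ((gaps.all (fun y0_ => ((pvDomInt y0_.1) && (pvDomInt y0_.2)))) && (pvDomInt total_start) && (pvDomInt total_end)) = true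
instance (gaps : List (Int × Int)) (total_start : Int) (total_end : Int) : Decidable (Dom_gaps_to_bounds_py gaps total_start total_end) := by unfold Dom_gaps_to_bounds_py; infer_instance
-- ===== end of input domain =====

-- B builds the whole breakpoint list first and pairs it up stride-2, instead of A's prev-accumulator sweep; alternative decomposition, same O(n) cost.


-- ===== PORT A =====
def gaps_to_bounds_py (gaps : List (Int × Int)) (total_start : Int) (total_end : Int) : List (Int × Int) :=
  let st := gaps.foldl (fun (st : List (Int × Int) × Int) g =>
    (if g.1 > st.2 then st.1 ++ [(st.2, g.1)] else st.1, g.2)) ([], total_start)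
  if st.2 < total_end then st.1 ++ [(st.2, total_end)] else st.1

-- ===== PORT B =====
-- consume the breakpoint list two points at a time (Source B's while loop popping two)
def pvPairUp : List Int → List (Int × Int)
  | a :: b :: rest => if a < b then (a, b) :: pvPairUp rest else pvPairUp rest
  | _ => []

def gaps_to_bounds_py_alt (gaps : List (Int × Int)) (total_start : Int) (total_end : Int) : List (Int × Int) :=
  pvPairUp (total_start :: gaps.flatMap (fun g => [g.1, g.2]) ++ [total_end])

-- ===== PRECONDITION & SPEC =====
def Spec_gaps_to_bounds_py (gaps : List (Int × Int)) (total_start : Int) (total_end : Int) (out : List (Int × Int)) : Prop := out = gaps_to_bounds_py_alt gaps total_start total_end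
instance (gaps : List (Int × Int)) (total_start : Int) (total_end : Int) (out : List (Int × Int)) : Decidable (Spec_gaps_to_bounds_py gaps total_start total_end out) := by unfold Spec_gaps_to_bounds_py; infer_instance

-- ===== CLAIM (what is proved, stated in full; the proofs are below) =====
def Claim_equal_gaps_to_bounds_py : Prop := ∀ (gaps : List (Int × Int)) (total_start : Int) (total_end : Int), Dom_gaps_to_bounds_py gaps total_start total_end → Spec_gaps_to_bounds_py gaps total_start total_end (gaps_to_bounds_py gaps total_start total_end)

-- ===== LEMMAS AND PROOFS =====
theorem pv_key (total_end : Int) : ∀ (gaps : List (Int × Int)) (acc : List (Int × Int)) (prev : Int),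
    (let st := gaps.foldl (fun (st : List (Int × Int) × Int) g =>
        (if g.1 > st.2 then st.1 ++ [(st.2, g.1)] else st.1, g.2)) (acc, prev)
     if st.2 < total_end then st.1 ++ [(st.2, total_end)] else st.1)
    = acc ++ pvPairUp (prev :: gaps.flatMap (fun g => [g.1, g.2]) ++ [total_end]) := by
  intro gaps
  induction gaps with
  | nil =>
    intro acc prev
    simp only [List.foldl, List.flatMap_nil]
    split_ifs with h <;> simp [pvPairUp, h]
  | cons g rest ih =>
    intro acc prev
    simp only [List.foldl, List.flatMap_cons, List.cons_append, List.append_assoc, pvPairUp]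
    by_cases h : g.1 > prev
    · simp only [if_pos h, ih]
      simp
    · simp only [if_neg h, ih]
      simp

-- ===== VERDICT (by name: the statement is the Claim_ definition above) =====
theorem gaps_to_bounds_py_spec : Claim_equal_gaps_to_bounds_py := by
  intro gaps ts te _
  unfold Spec_gaps_to_bounds_py gaps_to_bounds_py gaps_to_bounds_py_alt
  simpa using pv_key te gaps [] ts
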